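-- pv_equiv track=rewrite | github.com/pypdfium2-team/pypdfium2 | src/pypdfium2/_helpers/_internal/utils.py | color_tohex
-- ===== SOURCE A (Python) =====
-- def color_tohex(color, rev_byteorder):
--     """
--     Convert an RGBA color tuple to a single hex value (ARGB or ABGR).
--
--     Parameters:
--         color (tuple[int, int, int, int]):
--         rev_byteorder (bool):
--             If False, produce ARGB output.
--             If True, produce ABGR output for use with FPDF_REVERSE_BYTE_ORDER.
--     Returns:
--         int: Hex color value.
--     """
--
--     if len(color) != 4:
--         raise ValueError("Color must consist of exactly 4 values.")
--     if not all(0 <= c <= 255 for c in color):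
--         raise ValueError("Color value exceeds boundaries.")
--
--     # different color interpretation with FPDF_REVERSE_BYTE_ORDER might be a bug? at least it's not documented.
--     r, g, b, a = color
--     channels = (a, b, g, r) if rev_byteorder else (a, r, g, b)
--
--     c_color = 0
--     shift = 24
--     for c in channels:
--         c_color |= c << shift
--         shift -= 8
--
--     return c_color
-- ===== SOURCE B (Python) =====
-- def color_tohex(color, rev_byteorder):
--     if len(color) != 4:
--         raise ValueError("Color must consist of exactly 4 values.")
--     if not all(0 <= c <= 255 for c in color):
--         raise ValueError("Color value exceeds boundaries.")
--     r, g, b, a = color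
--     channels = (a, b, g, r) if rev_byteorder else (a, r, g, b)
--     # textual route: render each channel as two hex digits, then parse the
--     # 8-digit hex string back into an integer
--     return int("".join("%02x" % c for c in channels), 16)
-- ===== Notes on version B (the rewrite author's own statement) =====
-- stated objective: alternative
-- what changed: Replaces the shift-accumulate bit packing with a textual route: each channel is formatted as a two-digit lowercase hex string, the four pieces are joined, and the 8-digit hex string is parsed back with int(s, 16); validation and channel ordering are kept verbatim.
import Mathlib
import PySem

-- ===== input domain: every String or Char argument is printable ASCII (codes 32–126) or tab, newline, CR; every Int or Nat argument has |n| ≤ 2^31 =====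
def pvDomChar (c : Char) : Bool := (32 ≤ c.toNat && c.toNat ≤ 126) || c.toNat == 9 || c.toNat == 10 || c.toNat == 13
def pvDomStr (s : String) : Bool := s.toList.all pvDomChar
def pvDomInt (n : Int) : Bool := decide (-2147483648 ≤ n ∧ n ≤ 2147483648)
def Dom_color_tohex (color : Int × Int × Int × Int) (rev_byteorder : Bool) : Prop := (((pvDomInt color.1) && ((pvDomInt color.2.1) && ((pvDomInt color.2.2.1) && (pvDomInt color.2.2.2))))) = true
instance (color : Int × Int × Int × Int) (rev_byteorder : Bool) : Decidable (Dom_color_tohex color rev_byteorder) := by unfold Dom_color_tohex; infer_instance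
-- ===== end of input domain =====

-- B replaces A's shift-accumulate loop by a textual route (format each channel as two
-- hex digits, join, parse the 8-digit hex string with int(s,16)); validation and channel
-- ordering are unchanged. Equivalence is about the return value; A raises ValueError on
-- out-of-range channels (excluded by Pre_).

-- ===== PORT A =====
-- the `len(color) != 4` guard is always false for a 4-tuple, so it has no Lean counterpart;
-- the ValueError on an out-of-range channel is rendered as 0 and excluded by Pre_color_tohex.
def color_tohex (color : Int × Int × Int × Int) (rev_byteorder : Bool) : Int :=
  let r := color.1; let g := color.2.1; let b := color.2.2.1; let a := color.2.2.2
  if ¬ ([r, g, b, a].all (fun c => 0 ≤ c && c ≤ 255)) then 0  -- raise ValueError (outside Pre_)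
  else
    let channels : List Int := if rev_byteorder then [a, b, g, r] else [a, r, g, b]
    -- for c in channels: c_color |= c << shift; shift -= 8   (shift : Int, 24 → 16 → 8 → 0)
    (channels.foldl (fun (st : Int × Int) c => (PySem.Int.bor st.1 (c <<< st.2), st.2 - 8))
      ((0 : Int), (24 : Int))).1

-- ===== PORT B =====
-- hand port of '%x' for one hex digit 0..15 (lowercase, as Python's %x produces)
def hexDigitChar (n : Int) : Char :=
  if n = 0 then '0' else if n = 1 then '1' else if n = 2 then '2' else if n = 3 then '3'
  else if n = 4 then '4' else if n = 5 then '5' else if n = 6 then '6' else if n = 7 then '7'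
  else if n = 8 then '8' else if n = 9 then '9' else if n = 10 then 'a' else if n = 11 then 'b'
  else if n = 12 then 'c' else if n = 13 then 'd' else if n = 14 then 'e' else 'f'

-- hand port of one digit's value in int(s, 16); exact on lowercase hex digits, the only
-- characters B's strings contain
def hexDigitVal (ch : Char) : Int :=
  if '0' ≤ ch ∧ ch ≤ '9' then (ch.toNat : Int) - 48 else (ch.toNat : Int) - 87

def color_tohex_alt (color : Int × Int × Int × Int) (rev_byteorder : Bool) : Int :=
  let r := color.1; let g := color.2.1; let b := color.2.2.1; let a := color.2.2.2
  if ¬ ([r, g, b, a].all (fun c => 0 ≤ c && c ≤ 255)) then 0  -- raise ValueError (outside Pre_)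
  else
    let channels : List Int := if rev_byteorder then [a, b, g, r] else [a, r, g, b]
    -- "".join("%02x" % c for c in channels)
    let s : List Char :=
      channels.flatMap (fun c => [hexDigitChar (PySem.Int.floordiv c 16),
                                  hexDigitChar (PySem.Int.mod c 16)])
    -- int(s, 16): left-to-right base-16 accumulation over the digit characters
    s.foldl (fun acc ch => acc * 16 + hexDigitVal ch) 0

-- ===== PRECONDITION & SPEC =====
-- Pre_ excludes exactly the inputs on which A raises ValueError (a channel outside 0..255).
def Pre_color_tohex (color : Int × Int × Int × Int) (rev_byteorder : Bool) : Prop :=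
  (0 ≤ color.1 ∧ color.1 ≤ 255) ∧ (0 ≤ color.2.1 ∧ color.2.1 ≤ 255) ∧
  (0 ≤ color.2.2.1 ∧ color.2.2.1 ≤ 255) ∧ (0 ≤ color.2.2.2 ∧ color.2.2.2 ≤ 255)
instance (color : Int × Int × Int × Int) (rev_byteorder : Bool) : Decidable (Pre_color_tohex color rev_byteorder) := by unfold Pre_color_tohex; infer_instance

def pvWitness_color_tohex : (Int × Int × Int × Int) × Bool := ((1, 2, 3, 4), false)

def Spec_color_tohex (color : Int × Int × Int × Int) (rev_byteorder : Bool) (out : Int) : Prop := out = color_tohex_alt color rev_byteorder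
instance (color : Int × Int × Int × Int) (rev_byteorder : Bool) (out : Int) : Decidable (Spec_color_tohex color rev_byteorder out) := by unfold Spec_color_tohex; infer_instance

-- ===== CLAIM (what is proved, stated in full; the proofs are below) =====
def Claim_equal_color_tohex : Prop := ∀ (color : Int × Int × Int × Int) (rev_byteorder : Bool), Dom_color_tohex color rev_byteorder → Pre_color_tohex color rev_byteorder → Spec_color_tohex color rev_byteorder (color_tohex color rev_byteorder)

-- ===== LEMMAS AND PROOFS =====

-- a byte-shifted value or-ed with a smaller value is their sum
theorem or_shift_eq (m b : Nat) (k : Nat) (hb : b < 2 ^ k) : (m <<< k) ||| b = m * 2 ^ k + b := by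
  rw [← Nat.shiftLeft_add_eq_or_of_lt hb, Nat.shiftLeft_eq]

-- the A-side fold over four in-range channels equals the big-endian Horner form
theorem pack4 (c0 c1 c2 c3 : Int)
    (h0 : 0 ≤ c0 ∧ c0 ≤ 255) (h1 : 0 ≤ c1 ∧ c1 ≤ 255)
    (h2 : 0 ≤ c2 ∧ c2 ≤ 255) (h3 : 0 ≤ c3 ∧ c3 ≤ 255) :
    (([c0, c1, c2, c3].foldl (fun (st : Int × Int) c => (PySem.Int.bor st.1 (c <<< st.2), st.2 - 8))
      ((0 : Int), (24 : Int))).1) = ((c0 * 256 + c1) * 256 + c2) * 256 + c3 := by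
  obtain ⟨m0, rfl⟩ : ∃ m : Nat, c0 = (m : Int) := ⟨c0.toNat, (Int.toNat_of_nonneg h0.1).symm⟩
  obtain ⟨m1, rfl⟩ : ∃ m : Nat, c1 = (m : Int) := ⟨c1.toNat, (Int.toNat_of_nonneg h1.1).symm⟩
  obtain ⟨m2, rfl⟩ : ∃ m : Nat, c2 = (m : Int) := ⟨c2.toNat, (Int.toNat_of_nonneg h2.1).symm⟩
  obtain ⟨m3, rfl⟩ : ∃ m : Nat, c3 = (m : Int) := ⟨c3.toNat, (Int.toNat_of_nonneg h3.1).symm⟩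
  have b0 : m0 ≤ 255 := by exact_mod_cast h0.2
  have b1 : m1 ≤ 255 := by exact_mod_cast h1.2
  have b2 : m2 ≤ 255 := by exact_mod_cast h2.2
  have b3 : m3 ≤ 255 := by exact_mod_cast h3.2
  have s24 : ((m0 : Int) <<< (24 : Int)) = ((m0 <<< 24 : Nat) : Int) := by
    exact_mod_cast Int.shiftLeft_natCast m0 24
  have s16 : ((m1 : Int) <<< (16 : Int)) = ((m1 <<< 16 : Nat) : Int) := by
    exact_mod_cast Int.shiftLeft_natCast m1 16
  have s8 : ((m2 : Int) <<< (8 : Int)) = ((m2 <<< 8 : Nat) : Int) := by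
    exact_mod_cast Int.shiftLeft_natCast m2 8
  have s0 : ((m3 : Int) <<< (0 : Int)) = ((m3 : Nat) : Int) := by
    exact_mod_cast (Int.shiftLeft_natCast m3 0).trans (by simp [Nat.shiftLeft_eq])
  have e1 : (24 : Int) - 8 = 16 := by norm_num
  have e2 : (16 : Int) - 8 = 8 := by norm_num
  have e3 : (8 : Int) - 8 = 0 := by norm_num
  have hz : PySem.Int.bor 0 ((m0 <<< 24 : Nat) : Int) = ((m0 <<< 24 : Nat) : Int) := by
    rw [PySem.Int.bor_comm, PySem.Int.bor_zero]
  simp only [List.foldl, e1, e2, e3, s24, s16, s8, s0, hz, PySem.Int.bor_natCast]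
  rw [Nat.lor_assoc, Nat.lor_assoc]
  rw [or_shift_eq m2 m3 8 (by omega)]
  rw [or_shift_eq m1 (m2 * 2 ^ 8 + m3) 16 (by omega)]
  rw [or_shift_eq m0 (m1 * 2 ^ 16 + (m2 * 2 ^ 8 + m3)) 24 (by omega)]
  push_cast; ring

-- the hex round-trip on one digit
theorem hexVal_hexChar (n : Int) (h0 : 0 ≤ n) (h15 : n ≤ 15) :
    hexDigitVal (hexDigitChar n) = n := by
  interval_cases n <;> decide

-- parsing the two hex digits of one byte appends that byte to the accumulator
theorem byte_step (acc c : Int) (h0 : 0 ≤ c) (h255 : c ≤ 255) :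
    (acc * 16 + hexDigitVal (hexDigitChar (PySem.Int.floordiv c 16))) * 16
      + hexDigitVal (hexDigitChar (PySem.Int.mod c 16)) = acc * 256 + c := by
  rw [PySem.Int.floordiv_eq_ediv_of_pos (by norm_num), PySem.Int.mod_eq_emod_of_pos (by norm_num)]
  rw [hexVal_hexChar (c / 16) (by omega) (by omega)]
  rw [hexVal_hexChar (c % 16) (by omega) (by omega)]
  have := Int.ediv_add_emod c 16
  ring_nf
  omega

-- the B-side format-and-parse over four in-range channels equals the same Horner form
theorem parse4 (c0 c1 c2 c3 : Int)
    (h0 : 0 ≤ c0 ∧ c0 ≤ 255) (h1 : 0 ≤ c1 ∧ c1 ≤ 255)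
    (h2 : 0 ≤ c2 ∧ c2 ≤ 255) (h3 : 0 ≤ c3 ∧ c3 ≤ 255) :
    (([c0, c1, c2, c3].flatMap (fun c => [hexDigitChar (PySem.Int.floordiv c 16),
        hexDigitChar (PySem.Int.mod c 16)])).foldl
      (fun acc ch => acc * 16 + hexDigitVal ch) 0)
      = ((c0 * 256 + c1) * 256 + c2) * 256 + c3 := by
  simp only [List.flatMap, List.map, List.flatten, List.append, List.foldl, List.nil_append]
  rw [byte_step 0 c0 h0.1 h0.2]
  rw [byte_step _ c1 h1.1 h1.2]
  rw [byte_step _ c2 h2.1 h2.2]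
  rw [byte_step _ c3 h3.1 h3.2]
  ring

-- ===== VERDICT (by name: the statement is the Claim_ definition above) =====
theorem color_tohex_spec : Claim_equal_color_tohex := by
  intro ⟨r, g, b, a⟩ rev _ hpre
  obtain ⟨hr, hg, hb, ha⟩ := hpre
  dsimp only at hr hg hb ha
  show color_tohex (r, g, b, a) rev = color_tohex_alt (r, g, b, a) rev
  have hguard : ([r, g, b, a].all (fun c => 0 ≤ c && c ≤ 255)) = true := by
    simp only [List.all_cons, List.all_nil, Bool.and_true, Bool.and_eq_true, decide_eq_true_eq]
    omega
  simp only [color_tohex, color_tohex_alt, hguard, not_true, if_false]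
  cases rev
  · simp only [Bool.false_eq_true, if_false]
    rw [pack4 a r g b ha hr hg hb, parse4 a r g b ha hr hg hb]
  · simp only [if_true]
    rw [pack4 a b g r ha hb hg hr, parse4 a b g r ha hb hg hr]
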